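-- pv_equiv track=rewrite | github.com/TomCat2357/PresidioPDF | src/gui_pyqt/views/pdf_preview.py | _trim_chars
-- ===== SOURCE A (Python) =====
-- from typing import Optional, List, Dict, Tuple
--
-- def _trim_chars(chars: List[Dict]) -> List[Dict]:
--     """先頭末尾の空白文字を除去"""
--     if not chars:
--         return []
--
--     start_idx = 0
--     end_idx = len(chars) - 1
--     while start_idx <= end_idx and str(chars[start_idx].get("char", "")).isspace():
--         start_idx += 1
--     while end_idx >= start_idx and str(chars[end_idx].get("char", "")).isspace():
--         end_idx -= 1
--
--     if start_idx > end_idx: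
--         return []
--     return chars[start_idx:end_idx + 1]
-- ===== SOURCE B (Python) =====
-- def _trim_chars(chars):
--     """先頭末尾の空白文字を除去 (collect non-space indices in one pass, then slice once)"""
--     idx = [i for i, c in enumerate(chars) if not str(c.get("char", "")).isspace()]
--     if not idx:
--         return []
--     return chars[idx[0]:idx[-1] + 1]
-- ===== Notes on version B (the rewrite author's own statement) =====
-- stated objective: simpler
-- what changed: Replaces the two while-loops that shrink a start/end pointer from both ends with a single enumerate pass collecting all non-space indices, then one slice from the first to the last collected index.
import Mathlib
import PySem

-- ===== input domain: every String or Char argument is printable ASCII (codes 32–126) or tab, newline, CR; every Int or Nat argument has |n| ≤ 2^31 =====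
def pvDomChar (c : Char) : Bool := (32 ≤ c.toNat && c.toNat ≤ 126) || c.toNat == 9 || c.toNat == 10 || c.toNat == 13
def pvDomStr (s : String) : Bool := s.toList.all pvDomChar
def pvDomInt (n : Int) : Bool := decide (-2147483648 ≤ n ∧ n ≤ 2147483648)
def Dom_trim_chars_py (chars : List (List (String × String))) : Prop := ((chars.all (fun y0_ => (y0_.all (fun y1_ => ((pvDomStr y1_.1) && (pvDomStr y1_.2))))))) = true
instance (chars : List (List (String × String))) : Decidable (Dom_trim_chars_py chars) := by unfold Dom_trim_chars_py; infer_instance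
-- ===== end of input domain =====

-- B replaces A's two shrink-from-both-ends pointer loops by one enumerate pass collecting
-- the non-space indices followed by a single slice (simpler decomposition, same values).

-- shared field access: str(c.get("char", "")) (dict = assoc list, first match) and .isspace()
def pvGetChar (c : List (String × String)) : String :=
  match c.find? (fun p => p.1 == "char") with
  | some p => p.2
  | none => ""

def pvIsSp (c : List (String × String)) : Bool := PySem.Str.strIsspace (pvGetChar c)

-- ===== PORT A =====
-- the first while loop: advance start_idx while in range and the char is space
def pvTrimStart (chars : List (List (String × String))) (s : Nat) (e : Int) : Nat :=
  if h : (s : Int) ≤ e ∧ pvIsSp (chars.getD s []) = true then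
    pvTrimStart chars (s + 1) e
  else s
termination_by (e + 1 - (s : Int)).toNat
decreasing_by omega

-- the second while loop: retreat end_idx while ≥ start_idx and the char is space
-- (the loop guards keep the index in range, so `getD` never takes its default)
def pvTrimEnd (chars : List (List (String × String))) (s : Nat) (e : Int) : Int :=
  if h : (s : Int) ≤ e ∧ pvIsSp (chars.getD e.toNat []) = true then
    pvTrimEnd chars s (e - 1)
  else e
termination_by (e + 1 - (s : Int)).toNat
decreasing_by omega

def trim_chars_py (chars : List (List (String × String))) : List (List (String × String)) :=
  if chars = [] then []
  else
    let s := pvTrimStart chars 0 ((chars.length : Int) - 1)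
    let e := pvTrimEnd chars s ((chars.length : Int) - 1)
    if e < (s : Int) then []
    else PySem.List.slice chars (some (s : Int)) (some (e + 1))

-- ===== PORT B =====
def trim_chars_py_alt (chars : List (List (String × String))) : List (List (String × String)) :=
  let idx := (PySem.List.enumerate chars).filterMap
    (fun p => if pvIsSp p.2 = true then none else some p.1)
  match idx with
  | [] => []
  | i :: rest => PySem.List.slice chars (some i) (some ((i :: rest).getLast (by simp) + 1))

-- ===== PRECONDITION & SPEC =====
def Spec_trim_chars_py (chars : List (List (String × String))) (out : List (List (String × String))) : Prop := out = trim_chars_py_alt chars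
instance (chars : List (List (String × String))) (out : List (List (String × String))) : Decidable (Spec_trim_chars_py chars out) := by unfold Spec_trim_chars_py; infer_instance

-- ===== CLAIM (what is proved, stated in full; the proofs are below) =====
def Claim_equal_trim_chars_py : Prop := ∀ (chars : List (List (String × String))), Dom_trim_chars_py chars → Spec_trim_chars_py chars (trim_chars_py chars)

-- ===== LEMMAS AND PROOFS =====

-- the start loop lands on the first non-space index (or length if all spaces)
lemma pvTrimStart_eq (chars : List (List (String × String))) (s : Nat) (hs : s ≤ chars.length) :
    pvTrimStart chars s ((chars.length : Int) - 1)
      = s + (chars.drop s).findIdx (fun c => !pvIsSp c) := by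
  obtain ⟨k, hk⟩ : ∃ k, chars.length - s = k := ⟨_, rfl⟩
  induction k generalizing s with
  | zero =>
    have hsl : s = chars.length := by omega
    rw [pvTrimStart, dif_neg (by omega)]
    simp [hsl]
  | succ k ih =>
    have hlt : s < chars.length := by omega
    rw [pvTrimStart]
    rw [List.drop_eq_getElem_cons hlt, List.findIdx_cons]
    by_cases hsp : pvIsSp chars[s] = true
    · rw [dif_pos ⟨by omega, by rw [List.getD_eq_getElem chars [] hlt]; exact hsp⟩]
      rw [ih (s + 1) (by omega) (by omega)]
      simp [hsp]
      omega
    · rw [dif_neg (by rw [List.getD_eq_getElem chars [] hlt]; tauto)]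
      simp [hsp]

-- the end loop lands one-left-of-s plus the length of the right-trimmed in-range segment
lemma pvTrimEnd_eq (chars : List (List (String × String))) (s : Nat) (e : Int)
    (h1 : (s : Int) - 1 ≤ e) (h2 : e < chars.length) :
    pvTrimEnd chars s e
      = (s : Int) - 1 + ((((chars.drop s).take (e + 1 - s).toNat).reverse.dropWhile pvIsSp).length : Int) := by
  obtain ⟨k, hk⟩ : ∃ k, (e + 1 - s).toNat = k := ⟨_, rfl⟩
  induction k generalizing e with
  | zero =>
    have he : e = (s : Int) - 1 := by omega
    rw [pvTrimEnd, dif_neg (by omega)]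
    simp [hk]
    omega
  | succ k ih =>
    have hse : (s : Int) ≤ e := by omega
    have hm : (e + 1 - s).toNat = k + 1 := hk
    have het : (e.toNat : Int) = e := by omega
    have hlt : e.toNat < chars.length := by omega
    have hdl : k + s < chars.length := by omega
    have hgetd : (chars.drop s)[k]'(by simp [List.length_drop]; omega) = chars[e.toNat]'hlt := by
      rw [List.getElem_drop]
      congr 1
      omega
    have htake : ((chars.drop s).take (e + 1 - s).toNat).reverse
        = chars[e.toNat] :: ((chars.drop s).take k).reverse := by
      rw [hm, List.take_add_one, List.reverse_append]
      rw [List.getElem?_eq_getElem (by simp [List.length_drop]; omega)]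
      simp [hgetd]
    rw [pvTrimEnd, htake]
    by_cases hsp : pvIsSp (chars[e.toNat]'hlt) = true
    · rw [dif_pos ⟨hse, by rw [List.getD_eq_getElem chars [] hlt]; exact hsp⟩]
      rw [ih (e - 1) (by omega) (by omega) (by omega)]
      have : ((e - 1) + 1 - s).toNat = k := by omega
      rw [this, List.dropWhile_cons_of_pos hsp]
    · rw [dif_neg (by rw [List.getD_eq_getElem chars [] hlt]; tauto)]
      rw [List.dropWhile_cons_of_neg hsp]
      simp only [List.length_cons, List.length_reverse, List.length_take, List.length_drop]
      push_cast
      omega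

-- B's index list, generalized over the enumerate start
def pvIdx (u : List (List (String × String))) (k : Int) : List Int :=
  (PySem.List.enumerate u k).filterMap (fun p => if pvIsSp p.2 = true then none else some p.1)

lemma pvIdx_eq_nil_iff (u : List (List (String × String))) (k : Int) :
    pvIdx u k = [] ↔ ∀ c ∈ u, pvIsSp c = true := by
  induction u generalizing k with
  | nil => simp [pvIdx, PySem.List.enumerate_nil]
  | cons c t ih =>
    by_cases hsp : pvIsSp c = true
    · simp [pvIdx, PySem.List.enumerate_cons, hsp] at ih ⊢
      exact ih (k + 1)
    · simp [pvIdx, PySem.List.enumerate_cons, hsp]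

lemma pvIdx_head (u : List (List (String × String))) (k i : Int) (rest : List Int)
    (h : pvIdx u k = i :: rest) : i = k + (u.findIdx (fun c => !pvIsSp c) : Int) := by
  induction u generalizing k i rest with
  | nil => simp [pvIdx, PySem.List.enumerate_nil] at h
  | cons c t ih =>
    by_cases hsp : pvIsSp c = true
    · simp only [pvIdx, PySem.List.enumerate_cons, List.filterMap_cons, hsp, if_pos] at h
      have := ih (k + 1) i rest h
      rw [List.findIdx_cons, hsp]
      simp only [Bool.not_true, cond_false]
      push_cast
      omega
    · simp only [pvIdx, PySem.List.enumerate_cons, List.filterMap_cons, hsp] at h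
      rw [List.findIdx_cons]
      simp only [hsp, Bool.not_false, cond_true] at h ⊢
      simp at h
      omega

lemma pvIdx_getLast? (u : List (List (String × String))) (k : Int) :
    (pvIdx u k).getLast?
      = if (u.reverse.dropWhile pvIsSp).length = 0 then none
        else some (k + ((u.reverse.dropWhile pvIsSp).length : Int) - 1) := by
  induction u using List.reverseRecOn with
  | nil => simp [pvIdx, PySem.List.enumerate_nil]
  | append_singleton t c ih =>
    rw [List.reverse_append]
    simp only [List.reverse_cons, List.reverse_nil, List.nil_append, List.singleton_append]
    have henum : pvIdx (t ++ [c]) k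
        = pvIdx t k ++ (if pvIsSp c = true then [] else [k + (t.length : Int)]) := by
      simp [pvIdx, PySem.List.enumerate_append, PySem.List.enumerate_cons, PySem.List.enumerate_nil,
        List.filterMap_append]
      by_cases h : pvIsSp c = true <;> simp [h]
    by_cases hsp : pvIsSp c = true
    · rw [henum, if_pos hsp, List.append_nil, ih, List.dropWhile_cons_of_pos hsp]
    · rw [henum, if_neg hsp, List.getLast?_append, List.dropWhile_cons_of_neg hsp]
      simp
      omega

lemma alt_eq_match (chars : List (List (String × String))) :
    trim_chars_py_alt chars
      = (match pvIdx chars 0 with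
         | [] => []
         | i :: rest => PySem.List.slice chars (some i) (some ((i :: rest).getLast (by simp) + 1))) := rfl

lemma trim_eq_alt (chars : List (List (String × String))) :
    trim_chars_py chars = trim_chars_py_alt chars := by
  by_cases hne : chars = []
  · subst hne; rfl
  · have hn : 0 < chars.length := List.length_pos_iff.mpr hne
    set f := chars.findIdx (fun c => !pvIsSp c) with hf
    have hf_le : f ≤ chars.length := List.findIdx_le_length
    set t := chars.drop f with ht
    set L := (t.reverse.dropWhile pvIsSp).length with hL
    have htlen : t.length = chars.length - f := by simp [ht, List.length_drop]
    have hs0 : pvTrimStart chars 0 ((chars.length : Int) - 1) = f := by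
      rw [pvTrimStart_eq chars 0 (by omega)]; simp [hf]
    have he0 : pvTrimEnd chars f ((chars.length : Int) - 1) = (f : Int) - 1 + (L : Int) := by
      rw [pvTrimEnd_eq chars f ((chars.length : Int) - 1) (by omega) (by omega)]
      congr 2
      have : (((chars.length : Int) - 1) + 1 - f).toNat = t.length := by omega
      rw [this, List.take_length]
    rw [trim_chars_py, if_neg hne]
    simp only [hs0, he0]
    rw [alt_eq_match]
    by_cases hL0 : L = 0
    · -- all of t is space; combined with the prefix, everything is space
      have htsp : ∀ c ∈ t, pvIsSp c = true := by
        have := List.dropWhile_eq_nil_iff.mp (List.eq_nil_of_length_eq_zero (hL ▸ hL0))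
        intro c hc; exact this c (List.mem_reverse.mpr hc)
      have hallsp : ∀ c ∈ chars, pvIsSp c = true := by
        intro c hc
        obtain ⟨j, hj, rfl⟩ := List.mem_iff_getElem.mp hc
        by_cases hjf : j < f
        · have := List.not_of_lt_findIdx (p := fun c => !pvIsSp c) (hf ▸ hjf)
          simpa using this
        · have hjt : j - f < t.length := by omega
          have h2 : t[j - f] = chars[f + (j - f)]'(by omega) := by
            simp only [ht]; exact List.getElem_drop
          have h3 : chars[f + (j - f)]'(by omega) = chars[j]'hj := by
            congr 1; omega
          exact (h2.trans h3) ▸ htsp _ (List.getElem_mem hjt)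
      rw [(pvIdx_eq_nil_iff chars 0).mpr hallsp]
      rw [if_pos (by omega)]
    · -- there is a non-space character
      have htne : t ≠ [] := by
        intro h; rw [h] at hL; simp at hL; omega
      have hfn : f < chars.length := by
        rcases Nat.lt_or_ge f chars.length with h | h
        · exact h
        · exfalso; apply htne; rw [ht]; exact List.drop_eq_nil_of_le (by omega)
      have hfsp : pvIsSp (chars[f]'hfn) = false := by
        have := List.findIdx_getElem (p := fun c => !pvIsSp c) (w := hfn)
        simpa using this
      have hidx_ne : pvIdx chars 0 ≠ [] := by
        intro h
        have := (pvIdx_eq_nil_iff chars 0).mp h (chars[f]'hfn) (List.getElem_mem hfn)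
        rw [hfsp] at this; exact absurd this (by simp)
      obtain ⟨i, rest, hidx⟩ := List.exists_cons_of_ne_nil hidx_ne
      have hi : i = (f : Int) := by
        have := pvIdx_head chars 0 i rest hidx
        simpa [hf] using this
      -- length of the right-trim of the whole reversed list
      have hchars_decomp : chars = chars.take f ++ t := (List.take_append_drop f chars).symm
      have hLc : (chars.reverse.dropWhile pvIsSp) = t.reverse.dropWhile pvIsSp ++ (chars.take f).reverse := by
        conv_lhs => rw [hchars_decomp]
        rw [List.reverse_append, List.dropWhile_append]
        rw [if_neg (by
          intro h
          rw [List.isEmpty_iff] at h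
          exact hL0 (by rw [hL, h]; rfl))]
      have hLclen : (chars.reverse.dropWhile pvIsSp).length = L + f := by
        rw [hLc]; simp [List.length_take]; omega
      have hlast : (pvIdx chars 0).getLast? = some ((f : Int) + (L : Int) - 1) := by
        rw [pvIdx_getLast?, hLclen, if_neg (by omega)]
        congr 1
        push_cast
        ring
      rw [hidx] at hlast
      rw [List.getLast?_eq_some_getLast (by simp)] at hlast
      have hlast' : (i :: rest).getLast (by simp) = (f : Int) + (L : Int) - 1 := by
        injection hlast
      rw [hidx]
      rw [if_neg (by omega)]
      have hred : (match i :: rest with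
         | [] => ([] : List (List (String × String)))
         | j :: rest' => PySem.List.slice chars (some j) (some ((j :: rest').getLast (by simp) + 1)))
          = PySem.List.slice chars (some i) (some ((i :: rest).getLast (by simp) + 1)) := rfl
      rw [hred, hlast', hi]
      congr 2
      omega

-- ===== VERDICT (by name: the statement is the Claim_ definition above) =====
theorem trim_chars_py_spec : Claim_equal_trim_chars_py := by
  intro chars _
  unfold Spec_trim_chars_py
  exact trim_eq_alt chars
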